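-- pv_equiv track=rewrite | github.com/AlbertLlebaria/NLP_Project | main.py | find_word_indexes
-- ===== SOURCE A (Python) =====
-- def find_word_indexes(word, text_array):
--     found = False
--     index = 0
--     word_index = 0
--
--     while(found is False and index < len(text_array)-1):
--         if text_array[index].lower() == word.lower():
--             found = True
--         else:
--             word_index += len(text_array[index]) + 1
--             index += 1
--     if(index == len(text_array)-1):
--         return word_index - 1
--     else:
--         return word_index
-- ===== SOURCE B (Python) =====
-- def find_word_indexes(word, text_array):
--     # Search first, compute the offset separately: scan the tokens (the last one
--     # is never checked, matching the original's loop bound) for the first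
--     # case-insensitive match, then the character offset is a single prefix sum.
--     w = word.lower()
--     body = text_array[:-1]
--     for i, tok in enumerate(body):
--         if tok.lower() == w:
--             return sum(len(t) + 1 for t in body[:i])
--     return sum(len(t) + 1 for t in body) - 1
-- ===== Notes on version B (the rewrite author's own statement) =====
-- stated objective: alternative
-- what changed: B separates the search from the offset computation: an enumerate scan finds the first case-insensitively matching token (last token still never checked), then the character offset is computed once as a prefix sum; word.lower() is computed once instead of on every iteration as in A's interleaved while-loop.
-- intended difference: On the empty token list A returns 0 (its word_index-1 fix-up never fires because index==len(text_array)-1 is -1), while B returns -1, the same not-found convention (offset of the end minus one) A uses for every other unmatched input, which is the intended uniform behaviour. — e.g. on find_word_indexes("a", []): A returns 0, B returns -1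
import Mathlib
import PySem

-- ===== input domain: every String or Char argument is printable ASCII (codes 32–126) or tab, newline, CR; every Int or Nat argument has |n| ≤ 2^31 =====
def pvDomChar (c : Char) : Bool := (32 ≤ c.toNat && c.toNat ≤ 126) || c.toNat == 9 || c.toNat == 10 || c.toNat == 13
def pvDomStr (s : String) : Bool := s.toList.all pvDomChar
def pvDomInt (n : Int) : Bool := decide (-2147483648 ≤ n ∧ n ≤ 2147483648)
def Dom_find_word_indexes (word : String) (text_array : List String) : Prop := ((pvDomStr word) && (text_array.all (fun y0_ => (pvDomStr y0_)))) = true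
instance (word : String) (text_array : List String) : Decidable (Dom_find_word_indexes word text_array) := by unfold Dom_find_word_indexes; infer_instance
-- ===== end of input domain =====

-- B searches first (last token never checked, as in A) and computes the offset as a
-- separate prefix sum, instead of A's interleaved accumulate-while-scanning loop.

-- ===== PORT A =====
-- the while loop of A: state (index, word_index); 'found = True' exits the loop with
-- index < len-1, so the trailing 'index == len(text_array)-1' test is false and
-- word_index is returned directly.
def find_word_indexes_loop (word : String) (ts : List String) (index : Nat) (wi : Int) : Int :=
  if _h : (index : Int) < (ts.length : Int) - 1 then
    if PySem.Str.lower (ts.getD index "") = PySem.Str.lower word then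
      wi
    else
      find_word_indexes_loop word ts (index + 1) (wi + PySem.Str.len (ts.getD index "") + 1)
  else
    if (index : Int) = (ts.length : Int) - 1 then wi - 1 else wi
termination_by ts.length - index
decreasing_by omega

def find_word_indexes (word : String) (text_array : List String) : Int :=
  find_word_indexes_loop word text_array 0 0

-- ===== PORT B =====
-- sum(len(t) + 1 for t in l)
def pvSumLen (l : List String) : Int :=
  l.foldl (fun a t => a + PySem.Str.len t + 1) 0

-- the 'for i, tok in enumerate(body)' loop of B
def find_word_indexes_alt_loop (w : String) (body : List String) : List (Int × String) → Int
  | [] => pvSumLen body - 1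
  | (i, tok) :: rest =>
      if PySem.Str.lower tok = w then pvSumLen (PySem.List.slice body none (some i))
      else find_word_indexes_alt_loop w body rest

def find_word_indexes_alt (word : String) (text_array : List String) : Int :=
  let w := PySem.Str.lower word
  let body := PySem.List.slice text_array none (some (-1))
  find_word_indexes_alt_loop w body (PySem.List.enumerate body)

-- ===== PRECONDITION & SPEC =====
-- On the empty token list A returns 0 (its word_index-1 fix-up never fires because
-- index == len(text_array)-1 is -1), while B returns -1, the same not-found convention
-- A uses for every other unmatched input, which is the intended uniform behaviour.
def D_find_word_indexes (word : String) (text_array : List String) : Prop := text_array = []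
instance (word : String) (text_array : List String) : Decidable (D_find_word_indexes word text_array) := by unfold D_find_word_indexes; infer_instance

def Spec_find_word_indexes (word : String) (text_array : List String) (out : Int) : Prop := ¬ D_find_word_indexes word text_array → out = find_word_indexes_alt word text_array
instance (word : String) (text_array : List String) (out : Int) : Decidable (Spec_find_word_indexes word text_array out) := by unfold Spec_find_word_indexes; infer_instance

def pvDiffWitness_find_word_indexes : String × List String := ("a", [])
def pvDiffWitnessOut_find_word_indexes : Int × Int := (0, -1)

-- ===== CLAIM (what is proved, stated in full; the proofs are below) =====
def Claim_unchanged_find_word_indexes : Prop := ∀ (word : String) (text_array : List String), Dom_find_word_indexes word text_array → Spec_find_word_indexes word text_array (find_word_indexes word text_array)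
def Claim_changed_find_word_indexes : Prop := Dom_find_word_indexes (pvDiffWitness_find_word_indexes.1) (pvDiffWitness_find_word_indexes.2) ∧ D_find_word_indexes (pvDiffWitness_find_word_indexes.1) (pvDiffWitness_find_word_indexes.2) ∧ find_word_indexes (pvDiffWitness_find_word_indexes.1) (pvDiffWitness_find_word_indexes.2) = pvDiffWitnessOut_find_word_indexes.1 ∧ find_word_indexes_alt (pvDiffWitness_find_word_indexes.1) (pvDiffWitness_find_word_indexes.2) = pvDiffWitnessOut_find_word_indexes.2 ∧ pvDiffWitnessOut_find_word_indexes.1 ≠ pvDiffWitnessOut_find_word_indexes.2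
def Claim_exact_find_word_indexes : Prop := ∀ (word : String) (text_array : List String), Dom_find_word_indexes word text_array → D_find_word_indexes word text_array → find_word_indexes word text_array ≠ find_word_indexes_alt word text_array

-- ===== LEMMAS AND PROOFS =====

-- common reference recursion: scan the (already dropLast'ed) body carrying the offset
def pvRef (w : String) : List String → Int → Int
  | [], wi => wi - 1
  | t :: rest, wi => if PySem.Str.lower t = w then wi else pvRef w rest (wi + PySem.Str.len t + 1)

theorem pvSumLen_append_singleton (l : List String) (x : String) :
    pvSumLen (l ++ [x]) = pvSumLen l + PySem.Str.len x + 1 := by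
  simp only [pvSumLen, List.foldl_append, List.foldl_cons, List.foldl_nil]

-- A's loop equals pvRef on the remaining body, for ts ≠ []
theorem loopA_eq (word : String) (ts : List String) (hne : ts ≠ []) :
    ∀ (index : Nat) (wi : Int), index ≤ ts.length - 1 →
      find_word_indexes_loop word ts index wi = pvRef (PySem.Str.lower word) (ts.dropLast.drop index) wi := by
  have hlen : 1 ≤ ts.length := List.length_pos_of_ne_nil hne
  intro index
  induction hn : ts.length - index using Nat.strong_induction_on generalizing index with
  | _ n ih =>
    intro wi hle
    rw [find_word_indexes_loop]
    by_cases h : (index : Int) < (ts.length : Int) - 1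
    · have hidx : index < ts.length - 1 := by omega
      have hidx' : index < ts.dropLast.length := by simp [List.length_dropLast]; omega
      have hidx'' : index < ts.length := by omega
      have hdrop : ts.dropLast.drop index = ts.dropLast[index] :: ts.dropLast.drop (index + 1) :=
        List.drop_eq_getElem_cons hidx'
      have hget : ts.dropLast[index]'hidx' = ts[index]'hidx'' := List.getElem_dropLast hidx'
      have hgetD : ts.getD index "" = ts[index] := List.getD_eq_getElem ts "" hidx''
      rw [hdrop, hget, dif_pos h]
      by_cases hm : PySem.Str.lower ts[index] = PySem.Str.lower word
      · rw [if_pos (by rw [hgetD]; exact hm), pvRef, if_pos hm]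
      · rw [if_neg (by rw [hgetD]; exact hm), pvRef, if_neg hm, hgetD]
        exact ih (ts.length - (index + 1)) (by omega) (index + 1) rfl _ (by omega)
    · have hix : index = ts.length - 1 := by omega
      have : ts.dropLast.drop index = [] := by
        apply List.drop_eq_nil_of_le; simp [List.length_dropLast]; omega
      rw [this, pvRef, dif_neg h, if_pos (by omega)]

-- B's loop over the enumerate suffix equals pvRef, with the prefix sum as offset
theorem loopB_eq (w : String) (body : List String) :
    ∀ (k : Nat), k ≤ body.length →
      find_word_indexes_alt_loop w body (PySem.List.enumerate (body.drop k) (k : Int))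
        = pvRef w (body.drop k) (pvSumLen (body.take k)) := by
  intro k
  induction hn : body.length - k using Nat.strong_induction_on generalizing k with
  | _ n ih =>
    intro hk
    by_cases hlt : k < body.length
    · have hdrop : body.drop k = body[k] :: body.drop (k + 1) := List.drop_eq_getElem_cons hlt
      rw [hdrop, PySem.List.enumerate_cons, find_word_indexes_alt_loop]
      have htake : PySem.List.slice body none (some (k : Int)) = body.take k :=
        PySem.List.slice_to_natCast body k
      by_cases hm : PySem.Str.lower body[k] = w
      · rw [if_pos hm, pvRef, if_pos hm, htake]
      · rw [if_neg hm, pvRef, if_neg hm]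
        have hk1 : ((k : Int) + 1) = ((k + 1 : Nat) : Int) := by push_cast; ring
        have htk : body.take (k + 1) = body.take k ++ [body[k]] := by
          rw [List.take_add_one, List.getElem?_eq_getElem hlt]; simp
        have := ih (body.length - (k + 1)) (by omega) (k + 1) rfl (by omega)
        rw [hk1, this, htk, pvSumLen_append_singleton]
    · have hk' : k = body.length := by omega
      have : body.drop k = [] := List.drop_eq_nil_of_le (by omega)
      rw [this, PySem.List.enumerate_nil, find_word_indexes_alt_loop, pvRef]
      rw [hk', List.take_length]

-- ===== VERDICT (by name: the statement is the Claim_ definition above) =====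
theorem find_word_indexes_spec : Claim_unchanged_find_word_indexes := by
  intro word ts _ hD
  have hne : ts ≠ [] := hD
  unfold find_word_indexes find_word_indexes_alt
  rw [PySem.List.slice_to_neg_one]
  have hA := loopA_eq word ts hne 0 0 (by omega)
  have hB := loopB_eq (PySem.Str.lower word) ts.dropLast 0 (by omega)
  simp only [List.drop_zero, Nat.cast_zero, List.take_zero] at hA hB
  rw [hA, hB]; simp [pvSumLen]

theorem find_word_indexes_changed : Claim_changed_find_word_indexes := by
  unfold Claim_changed_find_word_indexes
  refine ⟨by decide, by decide, ?_, by decide, by decide⟩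
  show find_word_indexes "a" [] = 0
  rw [find_word_indexes, find_word_indexes_loop]
  norm_num

theorem find_word_indexes_tight : Claim_exact_find_word_indexes := by
  intro word ts _ hD
  subst hD
  unfold find_word_indexes find_word_indexes_alt
  rw [find_word_indexes_loop]
  simp [PySem.List.slice, find_word_indexes_alt_loop, pvSumLen]
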